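-- pv_equiv track=rewrite | github.com/maggick/adventofcode | 2023/07/day_07.py | weaker
-- ===== SOURCE A (Python) =====
-- from collections import deque
--
-- order = deque(['A', 'K', 'Q', 'J', 'T', '9', '8', '7', '6', '5', '4', '3', '2'])
--
-- def weaker(hand1, hand2,hand_score):
--     if hand_score[hand1]>hand_score[hand2]:
--         return False
--     if hand_score[hand1]<hand_score[hand2]:
--         return True
--
--     if hand_score[hand1]==hand_score[hand2]:
--         i=0
--         while i<len(hand1):
--             if order.index(hand1[i])>order.index(hand2[i]):
--                 return True
--             if order.index(hand1[i])<order.index(hand2[i]):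
--                 return False
--             i+=1
--
--     return False
-- ===== SOURCE B (Python) =====
-- ORDER = "AKQJT98765432"
--
-- def weaker(hand1, hand2, hand_score):
--     s1, s2 = hand_score[hand1], hand_score[hand2]
--     if s1 != s2:
--         return s1 < s2
--     # encode each hand as one base-13 number of card ranks; a weaker hand
--     # (higher rank index earlier) gets the larger number, so one integer
--     # comparison replaces the per-position tie-break
--     n1 = 0
--     for c in hand1:
--         n1 = n1 * 13 + ORDER.index(c)
--     n2 = 0
--     for c in hand2:
--         n2 = n2 * 13 + ORDER.index(c)
--     return n1 > n2
-- ===== Notes on version B (the rewrite author's own statement) =====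
-- stated objective: alternative
-- what changed: Replaces A's two-stage per-position while loop with repeated order.index comparisons by encoding each hand once into a single base-13 integer of card ranks and deciding the tie with one integer comparison.
-- outside the precondition, e.g. on weaker('2A', 'A?', {'2A': 1, 'A?': 1}): A returns True, B raises ValueError; on weaker('K', 'A2', {'K': 1, 'A2': 1}): A returns True, B returns False
import Mathlib
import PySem

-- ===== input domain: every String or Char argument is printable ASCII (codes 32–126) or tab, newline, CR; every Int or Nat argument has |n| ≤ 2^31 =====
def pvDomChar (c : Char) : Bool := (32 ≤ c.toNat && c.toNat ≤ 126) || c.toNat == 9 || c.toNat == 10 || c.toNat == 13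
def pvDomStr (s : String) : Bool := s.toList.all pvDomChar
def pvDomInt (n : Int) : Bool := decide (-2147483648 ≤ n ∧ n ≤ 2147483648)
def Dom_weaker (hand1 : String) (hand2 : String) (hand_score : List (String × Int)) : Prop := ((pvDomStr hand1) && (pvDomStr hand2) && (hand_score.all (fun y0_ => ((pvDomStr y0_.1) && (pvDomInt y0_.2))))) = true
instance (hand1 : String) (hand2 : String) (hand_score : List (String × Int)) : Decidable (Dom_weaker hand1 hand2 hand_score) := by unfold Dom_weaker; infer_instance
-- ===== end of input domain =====

-- B replaces A's per-position tie-break loop by packing each hand into one base-13 integer of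
-- card ranks and comparing the two integers (alternative decomposition; same cost, not faster).

-- ===== PORT A =====
-- the module-level constant `order`
def pvOrder : List Char := ['A', 'K', 'Q', 'J', 'T', '9', '8', '7', '6', '5', '4', '3', '2']

-- order.index(c); Python raises ValueError when c is absent — such inputs are outside Pre_
def pvIdxA (c : Char) : Nat := (PySem.List.index? pvOrder c).getD 0

-- the `while i < len(hand1)` loop, stepping through both hands in parallel;
-- the case hand1 longer than hand2 would be an IndexError in Python — outside Pre_
def pvLoopA : List Char → List Char → Bool
  | [], _ => false
  | _ :: _, [] => false
  | c1 :: t1, c2 :: t2 =>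
      if pvIdxA c1 > pvIdxA c2 then true
      else if pvIdxA c1 < pvIdxA c2 then false
      else pvLoopA t1 t2

def weaker (hand1 : String) (hand2 : String) (hand_score : List (String × Int)) : Bool :=
  let d := PySem.Dict.ofList hand_score
  let s1 := d.getD hand1 0       -- hand_score[hand1]; KeyError when absent — outside Pre_
  let s2 := d.getD hand2 0
  if s1 > s2 then false
  else if s1 < s2 then true
  else pvLoopA hand1.toList hand2.toList

-- ===== PORT B =====
-- the module-level constant ORDER = "AKQJT98765432"
def pvOrderStr : String := "AKQJT98765432"

-- ORDER.index(c); ValueError on an unknown card — outside Pre_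
def pvIdxB (c : Char) : Int := ((PySem.List.index? pvOrderStr.toList c).getD 0 : Nat)

-- `n = 0; for c in h: n = n*13 + ORDER.index(c)` as a fold with the same accumulator
def pvPackAux (a : Int) (l : List Char) : Int := l.foldl (fun n c => n * 13 + pvIdxB c) a

def weaker_alt (hand1 : String) (hand2 : String) (hand_score : List (String × Int)) : Bool :=
  let d := PySem.Dict.ofList hand_score
  let s1 := d.getD hand1 0       -- hand_score[hand1]; KeyError when absent — outside Pre_
  let s2 := d.getD hand2 0
  if s1 != s2 then decide (s1 < s2)
  else decide (pvPackAux 0 hand1.toList > pvPackAux 0 hand2.toList)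

-- ===== PRECONDITION & SPEC =====
-- Pre_ excludes inputs where A raises (a hand missing from hand_score: KeyError; a card outside
-- `order` reached by the tie-break loop: ValueError; hand1 longer than hand2 on a tie: IndexError)
-- and, on tied scores, hands of unequal length or with cards outside `order`: there A's value is an
-- accident of its early exit (it may return before reaching the bad position) while B encodes both
-- hands eagerly, so B may raise or weigh trailing cards A never looked at.
def Pre_weaker (hand1 : String) (hand2 : String) (hand_score : List (String × Int)) : Prop :=
  ((PySem.Dict.ofList hand_score).contains hand1 &&
   (PySem.Dict.ofList hand_score).contains hand2 &&
   ((PySem.Dict.ofList hand_score).getD hand1 0 != (PySem.Dict.ofList hand_score).getD hand2 0 ||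
     (hand1.toList.length == hand2.toList.length &&
      hand1.toList.all (fun c => decide (c ∈ pvOrder)) &&
      hand2.toList.all (fun c => decide (c ∈ pvOrder))))) = true
instance (hand1 : String) (hand2 : String) (hand_score : List (String × Int)) : Decidable (Pre_weaker hand1 hand2 hand_score) := by unfold Pre_weaker; infer_instance

def pvWitness_weaker : String × String × (List (String × Int)) :=
  ("AK", "AQ", [("AK", 5), ("AQ", 5)])

def Spec_weaker (hand1 : String) (hand2 : String) (hand_score : List (String × Int)) (out : Bool) : Prop := out = weaker_alt hand1 hand2 hand_score
instance (hand1 : String) (hand2 : String) (hand_score : List (String × Int)) (out : Bool) : Decidable (Spec_weaker hand1 hand2 hand_score out) := by unfold Spec_weaker; infer_instance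

-- ===== CLAIM (what is proved, stated in full; the proofs are below) =====
def Claim_equal_weaker : Prop := ∀ (hand1 : String) (hand2 : String) (hand_score : List (String × Int)), Dom_weaker hand1 hand2 hand_score → Pre_weaker hand1 hand2 hand_score → Spec_weaker hand1 hand2 hand_score (weaker hand1 hand2 hand_score)

-- ===== LEMMAS AND PROOFS =====

-- B's ORDER string spells A's `order` list
lemma orderStr_toList : pvOrderStr.toList = pvOrder := by decide

-- B's rank equals A's order.index on every card
lemma idxB_eq_idxA (c : Char) : pvIdxB c = (pvIdxA c : Int) := by
  simp [pvIdxB, pvIdxA, orderStr_toList]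

-- known cards have rank below 13
lemma idxA_lt_13 (c : Char) (hc : c ∈ pvOrder) : pvIdxA c < 13 := by
  fin_cases hc <;> decide

-- range of the packed value: a*13^n ≤ pvPackAux a l ≤ a*13^n + 13^n - 1 for known cards
lemma packAux_bounds (l : List Char) (h : ∀ c ∈ l, c ∈ pvOrder) (a : Int) :
    a * 13 ^ l.length ≤ pvPackAux a l ∧ pvPackAux a l ≤ a * 13 ^ l.length + 13 ^ l.length - 1 := by
  induction l generalizing a with
  | nil => simp [pvPackAux]
  | cons c t ih =>
    have hc : c ∈ pvOrder := h c (by simp)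
    have hlt : pvIdxA c < 13 := idxA_lt_13 c hc
    have hnn : (0 : Int) ≤ (pvIdxA c : Int) := Int.natCast_nonneg _
    have hlt' : (pvIdxA c : Int) < 13 := by exact_mod_cast hlt
    have ht := ih (fun x hx => h x (by simp [hx])) (a * 13 + pvIdxB c)
    have hpow : (0 : Int) < 13 ^ t.length := by positivity
    simp only [pvPackAux, List.foldl_cons] at ht ⊢
    rw [idxB_eq_idxA] at ht ⊢
    constructor
    · calc a * 13 ^ (c :: t).length = a * 13 * 13 ^ t.length := by
            rw [List.length_cons, pow_succ]; ring
        _ ≤ (a * 13 + (pvIdxA c : Int)) * 13 ^ t.length := by nlinarith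
        _ ≤ _ := ht.1
    · calc List.foldl (fun n c => n * 13 + pvIdxB c) (a * 13 + (pvIdxA c : Int)) t
          ≤ (a * 13 + (pvIdxA c : Int)) * 13 ^ t.length + 13 ^ t.length - 1 := ht.2
        _ ≤ a * 13 ^ (c :: t).length + 13 ^ (c :: t).length - 1 := by
            simp only [List.length_cons, pow_succ]; nlinarith

-- a strictly smaller accumulator keeps the packed value strictly smaller, length for length
lemma packAux_mono (l1 l2 : List Char) (hlen : l1.length = l2.length)
    (h1 : ∀ c ∈ l1, c ∈ pvOrder) (h2 : ∀ c ∈ l2, c ∈ pvOrder)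
    (a b : Int) (hab : a < b) : pvPackAux a l1 < pvPackAux b l2 := by
  have b1 := (packAux_bounds l1 h1 a).2
  have b2 := (packAux_bounds l2 h2 b).1
  have hpow : (0 : Int) < 13 ^ l1.length := by positivity
  rw [← hlen] at b2
  nlinarith

-- the heart: on equal-length hands of known cards, A's tie-break loop is B's comparison of
-- the packed base-13 numbers, for any shared accumulator
lemma loop_eq_pack (l1 l2 : List Char) (hlen : l1.length = l2.length)
    (h1 : ∀ c ∈ l1, c ∈ pvOrder) (h2 : ∀ c ∈ l2, c ∈ pvOrder) (a : Int) :
    pvLoopA l1 l2 = decide (pvPackAux a l1 > pvPackAux a l2) := by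
  induction l1 generalizing l2 a with
  | nil =>
    cases l2 with
    | nil => simp [pvLoopA, pvPackAux]
    | cons c t => simp at hlen
  | cons c1 t1 ih =>
    cases l2 with
    | nil => simp at hlen
    | cons c2 t2 =>
      have hc1 : c1 ∈ pvOrder := h1 c1 (by simp)
      have hc2 : c2 ∈ pvOrder := h2 c2 (by simp)
      have htl : t1.length = t2.length := by simpa using hlen
      have ht1 : ∀ c ∈ t1, c ∈ pvOrder := fun c hc => h1 c (by simp [hc])
      have ht2 : ∀ c ∈ t2, c ∈ pvOrder := fun c hc => h2 c (by simp [hc])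
      simp only [pvLoopA, pvPackAux, List.foldl_cons]
      simp only [idxB_eq_idxA c1, idxB_eq_idxA c2]
      rcases Nat.lt_trichotomy (pvIdxA c1) (pvIdxA c2) with h | h | h
      · have hb : ¬ pvIdxA c1 > pvIdxA c2 := by omega
        have hacc : a * 13 + (pvIdxA c1 : Int) < a * 13 + (pvIdxA c2 : Int) := by
          have : (pvIdxA c1 : Int) < (pvIdxA c2 : Int) := by exact_mod_cast h
          omega
        have := packAux_mono t1 t2 htl ht1 ht2 _ _ hacc
        simp only [pvPackAux] at this
        simp [hb, h, not_lt_of_gt this]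
      · have := ih t2 htl ht1 ht2 (a * 13 + (pvIdxA c1 : Int))
        simp only [pvPackAux] at this
        simp [h, this]
      · have hacc : a * 13 + (pvIdxA c2 : Int) < a * 13 + (pvIdxA c1 : Int) := by
          have : (pvIdxA c2 : Int) < (pvIdxA c1 : Int) := by exact_mod_cast h
          omega
        have := packAux_mono t2 t1 htl.symm ht2 ht1 _ _ hacc
        simp only [pvPackAux] at this
        simp [h, this]

-- ===== VERDICT (by name: the statement is the Claim_ definition above) =====
theorem weaker_spec : Claim_equal_weaker := by
  intro hand1 hand2 hand_score _hdom hpre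
  unfold Spec_weaker weaker weaker_alt
  unfold Pre_weaker at hpre
  simp only [Bool.and_eq_true, Bool.or_eq_true, bne_iff_ne, ne_eq, beq_iff_eq,
    List.all_eq_true, decide_eq_true_eq] at hpre
  obtain ⟨⟨_, _⟩, htie⟩ := hpre
  rcases Int.lt_trichotomy ((PySem.Dict.ofList hand_score).getD hand1 0)
      ((PySem.Dict.ofList hand_score).getD hand2 0) with h | h | h
  · simp [h, lt_asymm h, ne_of_lt h]
  · rcases htie with hne | ⟨⟨hlen, hc1⟩, hc2⟩
    · exact absurd h hne
    · simp [h, loop_eq_pack hand1.toList hand2.toList hlen hc1 hc2 0]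
  · simp [h, lt_asymm h, ne_of_gt h]
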